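-- pv_equiv track=rewrite | github.com/dStensland/LostCity | crawlers/sources/hosea_helps.py | is_free_event
-- ===== SOURCE A (Python) =====
-- def is_free_event(title: str, description: str = "") -> bool:
--     """Determine if event is free based on content."""
--     text = f"{title} {description}".lower()
--
--     # Most volunteer events are free
--     if any(word in text for word in ["volunteer", "serve", "help out"]):
--         return True
--
--     # Check for explicit free mentions
--     if any(word in text for word in ["free", "no cost", "no charge"]):
--         return True
--
--     # Check for paid indicators
--     if any(word in text for word in ["$", "ticket", "registration fee", "cost:", "price:"]):
--         # But note: donation drives might mention $ without being paid
--         if "donation" in text or "fundraiser" in text: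
--             return True
--         return False
--
--     # Default to True for Hosea Helps events (most are volunteer)
--     return True
-- ===== SOURCE B (Python) =====
-- FREE_WORDS = ["volunteer", "serve", "help out", "free", "no cost", "no charge"]
-- PAID_WORDS = ["$", "ticket", "registration fee", "cost:", "price:"]
-- SPECIAL_WORDS = ["donation", "fundraiser"]
--
--
-- def is_free_event(title: str, description: str = "") -> bool:
--     """Determine if event is free: single scan over the text with a prefix-match table."""
--     text = f"{title} {description}".lower()
--     paid = False
--     special = False
--     for i in range(len(text)):
--         if any(text.startswith(w, i) for w in FREE_WORDS):
--             return True
--         if any(text.startswith(w, i) for w in PAID_WORDS):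
--             paid = True
--         if any(text.startswith(w, i) for w in SPECIAL_WORDS):
--             special = True
--     return special or not paid
-- ===== Notes on version B (the rewrite author's own statement) =====
-- stated objective: alternative
-- what changed: Replaced A's per-keyword substring-containment cascade (one `in` search per keyword) with a single left-to-right scan over the text that prefix-matches the keyword table at each position, short-circuiting on a free keyword and accumulating paid/donation flags combined at the end.
import Mathlib
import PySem

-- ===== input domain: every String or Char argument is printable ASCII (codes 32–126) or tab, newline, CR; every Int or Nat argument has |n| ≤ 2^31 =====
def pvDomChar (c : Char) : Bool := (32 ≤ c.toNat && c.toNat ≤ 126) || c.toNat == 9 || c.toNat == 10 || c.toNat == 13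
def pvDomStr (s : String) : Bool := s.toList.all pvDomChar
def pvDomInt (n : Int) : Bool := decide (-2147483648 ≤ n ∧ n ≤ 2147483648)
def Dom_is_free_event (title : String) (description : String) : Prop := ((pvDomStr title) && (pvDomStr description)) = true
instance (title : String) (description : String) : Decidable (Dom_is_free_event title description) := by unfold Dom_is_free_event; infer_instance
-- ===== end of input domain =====

-- B replaces A's per-keyword substring-containment cascade with a single left-to-right
-- scan over the text that prefix-matches a keyword table at each position (objective: alternative).

-- ===== PORT A =====
def is_free_event (title : String) (description : String) : Bool :=
  let text := PySem.Str.lower (String.ofList (title.toList ++ ' ' :: description.toList))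
  if ["volunteer", "serve", "help out"].any (fun word => PySem.Str.isIn word text) then
    true
  else if ["free", "no cost", "no charge"].any (fun word => PySem.Str.isIn word text) then
    true
  else if ["$", "ticket", "registration fee", "cost:", "price:"].any (fun word => PySem.Str.isIn word text) then
    if PySem.Str.isIn "donation" text || PySem.Str.isIn "fundraiser" text then
      true
    else
      false
  else
    true

-- ===== PORT B =====
def pvFreeWords : List String := ["volunteer", "serve", "help out", "free", "no cost", "no charge"]
def pvPaidWords : List String := ["$", "ticket", "registration fee", "cost:", "price:"]
def pvSpecialWords : List String := ["donation", "fundraiser"]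

-- the scan loop of Source B: `tail` is text[i:]; startswith = List.isPrefixOf
def pvScan : List Char → Bool → Bool → Bool
  | [], paid, special => special || !paid
  | c :: rest, paid, special =>
    if pvFreeWords.any (fun w => w.toList.isPrefixOf (c :: rest)) then true
    else pvScan rest
      (paid || pvPaidWords.any (fun w => w.toList.isPrefixOf (c :: rest)))
      (special || pvSpecialWords.any (fun w => w.toList.isPrefixOf (c :: rest)))

def is_free_event_alt (title : String) (description : String) : Bool :=
  let text := PySem.Str.lower (String.ofList (title.toList ++ ' ' :: description.toList))
  pvScan text.toList false false

-- ===== PRECONDITION & SPEC =====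
def Spec_is_free_event (title : String) (description : String) (out : Bool) : Prop := out = is_free_event_alt title description
instance (title : String) (description : String) (out : Bool) : Decidable (Spec_is_free_event title description out) := by unfold Spec_is_free_event; infer_instance

-- ===== CLAIM (what is proved, stated in full; the proofs are below) =====
def Claim_equal_is_free_event : Prop := ∀ (title : String) (description : String), Dom_is_free_event title description → Spec_is_free_event title description (is_free_event title description)

-- ===== LEMMAS AND PROOFS =====

-- boolean "w is a contiguous substring of cs"
def pvInf (w cs : List Char) : Bool := decide (w <:+: cs)

theorem pvInf_cons (w : List Char) (c : Char) (r : List Char) :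
    pvInf w (c :: r) = (w.isPrefixOf (c :: r) || pvInf w r) := by
  by_cases h : w <:+: (c :: r) <;>
    simp_all [pvInf, List.infix_cons_iff, Bool.eq_false_iff, List.isPrefixOf_iff_prefix]

theorem pvAnyOr {a : Type} (l : List a) (p q : a → Bool) :
    (l.any fun x => p x || q x) = (l.any p || l.any q) := by
  induction l with
  | nil => rfl
  | cons x t ih => simp only [List.any_cons, ih]; ac_rfl

theorem pvScan_eq (cs : List Char) (p s : Bool) :
    pvScan cs p s =
      (pvFreeWords.any (fun w => pvInf w.toList cs) ||
        ((s || pvSpecialWords.any (fun w => pvInf w.toList cs)) ||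
          !(p || pvPaidWords.any (fun w => pvInf w.toList cs)))) := by
  induction cs generalizing p s with
  | nil => revert p s; decide
  | cons c r ih =>
    simp only [pvScan, ih, pvInf_cons, pvAnyOr]
    generalize pvFreeWords.any (fun w => w.toList.isPrefixOf (c :: r)) = fa
    generalize pvPaidWords.any (fun w => w.toList.isPrefixOf (c :: r)) = pa
    generalize pvSpecialWords.any (fun w => w.toList.isPrefixOf (c :: r)) = sa
    generalize pvFreeWords.any (fun w => pvInf w.toList r) = fr
    generalize pvPaidWords.any (fun w => pvInf w.toList r) = pr
    generalize pvSpecialWords.any (fun w => pvInf w.toList r) = sr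
    revert p s fa pa sa fr pr sr; decide

theorem isIn_eq_pvInf (sub s : String) : PySem.Str.isIn sub s = pvInf sub.toList s.toList := by
  by_cases h : sub.toList <:+: s.toList
  · simp only [pvInf, h, decide_true]
    exact (PySem.Str.isIn_iff_infix sub s).mpr h
  · simp only [pvInf, h, decide_false]
    exact Bool.eq_false_iff.mpr (fun hc => h ((PySem.Str.isIn_iff_infix sub s).mp hc))

-- ===== VERDICT (by name: the statement is the Claim_ definition above) =====
theorem is_free_event_spec : Claim_equal_is_free_event := by
  intro title description _
  unfold Spec_is_free_event is_free_event is_free_event_alt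
  simp only [pvScan_eq, pvFreeWords, pvPaidWords, pvSpecialWords,
    List.any_cons, List.any_nil, isIn_eq_pvInf, Bool.or_false]
  generalize pvInf (String.toList "volunteer") _ = a1
  generalize pvInf (String.toList "serve") _ = a2
  generalize pvInf (String.toList "help out") _ = a3
  generalize pvInf (String.toList "free") _ = a4
  generalize pvInf (String.toList "no cost") _ = a5
  generalize pvInf (String.toList "no charge") _ = a6
  generalize pvInf (String.toList "$") _ = b1
  generalize pvInf (String.toList "ticket") _ = b2
  generalize pvInf (String.toList "registration fee") _ = b3
  generalize pvInf (String.toList "cost:") _ = b4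
  generalize pvInf (String.toList "price:") _ = b5
  generalize pvInf (String.toList "donation") _ = d1
  generalize pvInf (String.toList "fundraiser") _ = d2
  revert a1 a2 a3 a4 a5 a6 b1 b2 b3 b4 b5 d1 d2; decide
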